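-- pv_equiv track=rewrite | github.com/wkumagai/TradeGraph | src/tradegraph/features/retrieve/get_paper_titles_subgraph/nodes/filter_titles_by_queries.py | filter_titles_by_queries
-- ===== SOURCE A (Python) =====
-- from typing import Any
--
-- def _match_score(text: str, query: str) -> int:
--     """Simple matching score: number of occurrences of query in text"""
--     return text.count(query)
--
-- def _filter_papers_for_single_query(
--     papers: list[dict[str, Any]],
--     query: str,
--     max_results: int | None = None,
-- ) -> list[str]:
--     query = query.lower().strip()
--     if not query:
--         return []
--
--     scored_papers = []
--     for paper in papers:
--         searchable_text = " ".join(
--             [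
--                 paper.get("title", ""),
--                 # paper.get("abstract", ""),
--                 # " ".join(paper.get("authors", [])),
--                 # paper.get("topic", "")
--             ]
--         ).lower()
--
--         score = _match_score(searchable_text, query)
--         if score > 0:
--             scored_papers.append((score, paper.get("title", "No Title Found")))
--
--     scored_papers.sort(key=lambda x: x[0], reverse=True)
--
--     return [title for _, title in scored_papers[:max_results]]
--
-- def filter_titles_by_queries(
--     papers: list[dict[str, Any]],
--     queries: list[str],
--     max_results_per_query: int | None = None,
-- ) -> list[str]:
--     """各クエリごとの上位マッチ結果を統合し、重複を排除したリストを返す"""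
--     seen = set()
--     unique_titles: list[str] = []
--
--     for query in queries:
--         if query and not query.isspace():
--             matched_titles = _filter_papers_for_single_query(
--                 papers, query, max_results=max_results_per_query
--             )
--             for title in matched_titles:
--                 if title not in seen:
--                     seen.add(title)
--                     unique_titles.append(title)
--
--     return unique_titles
-- ===== SOURCE B (Python) =====
-- def filter_titles_by_queries(papers, queries, max_results_per_query=None):
--     """Same results as A, but each query's ranking is built by grouping titles
--     by score in a dict and flattening groups in descending score order
--     (stable ties for free) instead of a comparison sort."""
--     seen = set()
--     unique_titles = []
--     for query in queries:
--         if query and not query.isspace():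
--             q = query.lower().strip()
--             if not q:
--                 continue
--             groups = {}
--             for paper in papers:
--                 n = paper.get("title", "").lower().count(q)
--                 if n > 0:
--                     groups[n] = groups.get(n, []) + [paper.get("title", "No Title Found")]
--             ranked = []
--             for s in sorted(groups, reverse=True):
--                 ranked += groups[s]
--             for title in ranked[:max_results_per_query]:
--                 if title not in seen:
--                     seen.add(title)
--                     unique_titles.append(title)
--     return unique_titles
-- ===== Notes on version B (the rewrite author's own statement) =====
-- stated objective: alternative
-- what changed: Each query's per-paper ranking replaces the stable comparison sort of (score, title) pairs with a group-by-score dict flattened in descending key order (ties keep paper order for free); dedup across queries is unchanged.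
import Mathlib
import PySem

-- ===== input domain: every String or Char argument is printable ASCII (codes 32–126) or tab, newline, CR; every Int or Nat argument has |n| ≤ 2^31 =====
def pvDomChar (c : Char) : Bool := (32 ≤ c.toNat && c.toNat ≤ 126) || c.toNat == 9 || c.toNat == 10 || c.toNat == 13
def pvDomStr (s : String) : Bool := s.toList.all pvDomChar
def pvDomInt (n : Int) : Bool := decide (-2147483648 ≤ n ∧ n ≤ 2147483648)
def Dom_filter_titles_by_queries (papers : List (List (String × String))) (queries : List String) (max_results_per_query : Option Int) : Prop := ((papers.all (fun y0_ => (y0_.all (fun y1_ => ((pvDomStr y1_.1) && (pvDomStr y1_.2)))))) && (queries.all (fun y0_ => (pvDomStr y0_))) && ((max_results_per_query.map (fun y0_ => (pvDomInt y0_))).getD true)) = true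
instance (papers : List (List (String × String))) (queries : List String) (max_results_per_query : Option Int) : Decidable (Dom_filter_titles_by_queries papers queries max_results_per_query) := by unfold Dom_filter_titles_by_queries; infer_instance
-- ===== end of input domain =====

-- B replaces each query's stable comparison sort of (score, title) pairs by a group-by-score
-- dict flattened in descending key order (alternative decomposition, same results).

-- ===== PORT A =====
-- _match_score(text, query) = text.count(query)
def pvMatchScoreA (text : String) (query : String) : Int := (PySem.Str.count text query : Int)

-- _filter_papers_for_single_query(papers, query, max_results)
def pvFilterSingleA (papers : List (List (String × String))) (query : String) (max_results : Option Int) : List String :=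
  let q := PySem.Str.strip (PySem.Str.lower query)
  if q == "" then []
  else
    let scored := papers.foldl (fun (acc : List (Int × String)) paper =>
      let searchable := PySem.Str.lower (PySem.Str.join " " [PySem.Dict.getD (PySem.Dict.mk paper) "title" ""])
      let score := pvMatchScoreA searchable q
      if 0 < score then acc ++ [(score, PySem.Dict.getD (PySem.Dict.mk paper) "title" "No Title Found")] else acc) []
    let sortedScored := PySem.List.sorted scored (fun p => p.1) true
    (PySem.List.slice sortedScored none max_results).map (fun p => p.2)

def filter_titles_by_queries (papers : List (List (String × String))) (queries : List String) (max_results_per_query : Option Int) : List String :=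
  (queries.foldl (fun (st : PySem.Set String × List String) query =>
    if !(query == "") && !(PySem.Str.strIsspace query) then
      (pvFilterSingleA papers query max_results_per_query).foldl
        (fun (st : PySem.Set String × List String) title =>
          if PySem.Set.contains st.1 title then st else (PySem.Set.add st.1 title, st.2 ++ [title])) st
    else st) (PySem.Set.empty, [])).2

-- ===== PORT B =====
def pvTitleLowB (paper : List (String × String)) : String :=
  PySem.Str.lower (PySem.Dict.getD (PySem.Dict.mk paper) "title" "")

def pvScoreB (paper : List (String × String)) (q : String) : Int :=
  (PySem.Str.count (pvTitleLowB paper) q : Int)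

def pvTitleB (paper : List (String × String)) : String :=
  PySem.Dict.getD (PySem.Dict.mk paper) "title" "No Title Found"

-- groups[n] = groups.get(n, []) + [title]
def pvGroupsB (papers : List (List (String × String))) (q : String) : PySem.Dict Int (List String) :=
  papers.foldl (fun d paper =>
    if 0 < pvScoreB paper q then d.modify (pvScoreB paper q) [] (fun g => g ++ [pvTitleB paper]) else d)
    PySem.Dict.empty

-- ranked = []; for s in sorted(groups, reverse=True): ranked += groups[s]
-- (groups[s] with s a present key is ported as getD s [], exact since every iterated key is present)
def pvRankedB (papers : List (List (String × String))) (q : String) : List String :=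
  (PySem.List.sorted (pvGroupsB papers q).keys (fun s => s) true).foldl
    (fun acc s => acc ++ (pvGroupsB papers q).getD s []) []

def filter_titles_by_queries_alt (papers : List (List (String × String))) (queries : List String) (max_results_per_query : Option Int) : List String :=
  (queries.foldl (fun (st : PySem.Set String × List String) query =>
    if !(query == "") && !(PySem.Str.strIsspace query) then
      let q := PySem.Str.strip (PySem.Str.lower query)
      if q == "" then st
      else
        (PySem.List.slice (pvRankedB papers q) none max_results_per_query).foldl
          (fun (st : PySem.Set String × List String) title =>
            if PySem.Set.contains st.1 title then st else (PySem.Set.add st.1 title, st.2 ++ [title])) st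
    else st) (PySem.Set.empty, [])).2

-- ===== PRECONDITION & SPEC =====
def Spec_filter_titles_by_queries (papers : List (List (String × String))) (queries : List String) (max_results_per_query : Option Int) (out : List String) : Prop := out = filter_titles_by_queries_alt papers queries max_results_per_query
instance (papers : List (List (String × String))) (queries : List String) (max_results_per_query : Option Int) (out : List String) : Decidable (Spec_filter_titles_by_queries papers queries max_results_per_query out) := by unfold Spec_filter_titles_by_queries; infer_instance

-- ===== CLAIM (what is proved, stated in full; the proofs are below) =====
def Claim_equal_filter_titles_by_queries : Prop := ∀ (papers : List (List (String × String))) (queries : List String) (max_results_per_query : Option Int), Dom_filter_titles_by_queries papers queries max_results_per_query → Spec_filter_titles_by_queries papers queries max_results_per_query (filter_titles_by_queries papers queries max_results_per_query)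

-- ===== LEMMAS AND PROOFS =====

-- the filtered scored list both per-query rankings are about
def pvSpB (papers : List (List (String × String))) (q : String) : List (Int × String) :=
  (papers.filter (fun paper => decide (0 < pvScoreB paper q))).map (fun paper => (pvScoreB paper q, pvTitleB paper))

lemma pvJoinSingle (sep t : String) : PySem.Str.join sep [t] = t := by
  simp [PySem.Str.join, PySem.Chars.join, List.intercalate]

-- insertBy walks past a block it does not go before
lemma pvInsertBySkip (x : Int × String) (l1 l2 : List (Int × String))
    (h : ∀ y ∈ l1, ¬ (y.1 < x.1)) :
    PySem.List.insertBy (fun a b => decide (b.1 < a.1)) x (l1 ++ l2)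
      = l1 ++ PySem.List.insertBy (fun a b => decide (b.1 < a.1)) x l2 := by
  induction l1 with
  | nil => simp
  | cons y ys ih =>
    have hy := h y (by simp)
    simp [PySem.List.insertBy, hy, ih (fun z hz => h z (by simp [hz]))]

lemma pvInsertByFront (x : Int × String) (l : List (Int × String))
    (h : ∀ y ∈ l, y.1 < x.1) :
    PySem.List.insertBy (fun a b => decide (b.1 < a.1)) x l = x :: l := by
  cases l with
  | nil => rfl
  | cons y ys => simp [PySem.List.insertBy, h y (by simp)]

lemma pvSortedSnoc (l : List (Int × String)) (x : Int × String) :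
    PySem.List.sorted (l ++ [x]) (fun p => p.1) true
      = PySem.List.insertBy (fun a b => decide (b.1 < a.1)) x (PySem.List.sorted l (fun p => p.1) true) := by
  rw [PySem.List.sorted_rev_eq_foldl_insertBy, PySem.List.sorted_rev_eq_foldl_insertBy, List.foldl_append]
  rfl

-- stable reverse sort pulls the max-key block to the front, in input order
lemma pvMaxPull (k : Int) (sp : List (Int × String)) (h : ∀ p ∈ sp, p.1 ≤ k) :
    PySem.List.sorted sp (fun p => p.1) true
      = sp.filter (fun p => p.1 == k)
        ++ PySem.List.sorted (sp.filter (fun p => !(p.1 == k))) (fun p => p.1) true := by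
  induction sp using List.reverseRecOn with
  | nil => rfl
  | append_singleton sp x ih =>
    have hx : x.1 ≤ k := h x (by simp)
    have hsp : ∀ p ∈ sp, p.1 ≤ k := fun p hp => h p (by simp [hp])
    rw [pvSortedSnoc, ih hsp]
    by_cases hk : x.1 = k
    · rw [pvInsertBySkip _ _ _ ?hF, pvInsertByFront _ _ ?hS]
      · simp [List.filter_append, hk]
      case hF =>
        intro y hy
        have hy1 : (y.1 == k) = true := (List.mem_filter.mp hy).2
        have : y.1 = k := by simpa using hy1
        omega
      case hS =>
        intro y hy
        have hy' := (PySem.List.mem_sorted _ _ _ y).mp hy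
        have h1 : ¬ y.1 = k := by simpa using (List.mem_filter.mp hy').2
        have h2 : y.1 ≤ k := hsp y (List.mem_filter.mp hy').1
        omega
    · have hlt : x.1 < k := lt_of_le_of_ne hx hk
      rw [pvInsertBySkip _ _ _ ?hF]
      · rw [← pvSortedSnoc]
        simp [List.filter_append, hk]
      case hF =>
        intro y hy
        have : y.1 = k := by simpa using (List.mem_filter.mp hy).2
        omega

-- stable reverse sort = flatten of same-key groups along any strictly descending key cover
lemma pvGroupSort (ks : List Int) (sp : List (Int × String))
    (hks : ks.Pairwise (fun a b => b < a)) (hmem : ∀ p ∈ sp, p.1 ∈ ks) :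
    PySem.List.sorted sp (fun p => p.1) true
      = ks.flatMap (fun s => sp.filter (fun p => p.1 == s)) := by
  induction ks generalizing sp with
  | nil =>
    have hnil : sp = [] := by
      cases sp with
      | nil => rfl
      | cons p t => exact absurd (hmem p (by simp)) (by simp)
    subst hnil; rfl
  | cons k ks ih =>
    rcases List.pairwise_cons.mp hks with ⟨hk, hks'⟩
    have hle : ∀ p ∈ sp, p.1 ≤ k := by
      intro p hp
      rcases List.mem_cons.mp (hmem p hp) with h1 | h2
      · omega
      · exact le_of_lt (hk _ h2)
    rw [pvMaxPull k sp hle, List.flatMap_cons]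
    congr 1
    rw [ih _ hks' ?mem]
    · apply List.flatMap_congr
      intro s hs
      have hsk : s ≠ k := by have := hk s hs; omega
      rw [List.filter_filter]
      apply List.filter_congr
      intro p _
      by_cases hp : p.1 = s
      · simp [hp, hsk]
      · simp [hp]
    case mem =>
      intro p hp
      have h1 := List.mem_filter.mp hp
      have h2 : ¬ p.1 = k := by simpa using h1.2
      rcases List.mem_cons.mp (hmem p h1.1) with h3 | h3
      · omega
      · exact h3

lemma pvGroupsKeys (papers : List (List (String × String))) (q : String) :
    (pvGroupsB papers q).keys = PySem.Set.ofList ((pvSpB papers q).map (fun p => p.1)) := by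
  unfold pvGroupsB pvSpB
  simp only [PySem.List.foldl_ite_eq_foldl_filter]
  rw [PySem.Dict.keys_foldl_modify_key _ (fun paper => pvScoreB paper q) []
        (fun _ paper => fun g => g ++ [pvTitleB paper])]
  rw [PySem.Set.ofList_eq_foldl]
  simp [PySem.Dict.keys_empty, List.map_map, PySem.Set.update, Function.comp_def]

lemma pvGroupsGetD (papers : List (List (String × String))) (q : String) (s : Int) :
    (pvGroupsB papers q).getD s [] = ((pvSpB papers q).filter (fun p => p.1 == s)).map (fun p => p.2) := by
  unfold pvGroupsB pvSpB
  simp only [PySem.List.foldl_ite_eq_foldl_filter]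
  rw [← List.foldl_map (f := fun paper => (pvScoreB paper q, pvTitleB paper))
        (g := fun (d : PySem.Dict Int (List String)) (p : Int × String) => d.modify p.1 [] (fun g => g ++ [p.2]))]
  rw [PySem.Dict.getD_foldl_modify_append]
  simp [PySem.Dict.getD_empty]

lemma pvRankedB_eq (papers : List (List (String × String))) (q : String) :
    pvRankedB papers q = (PySem.List.sorted (pvSpB papers q) (fun p => p.1) true).map (fun p => p.2) := by
  unfold pvRankedB
  rw [PySem.List.foldl_append_eq_flatMap]
  rw [List.flatMap_congr (fun s _ => pvGroupsGetD papers q s)]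
  rw [pvGroupsKeys]
  rw [← List.map_flatMap]
  have h1 := PySem.List.sorted_pairwise_rev (PySem.Set.ofList ((pvSpB papers q).map (fun p => p.1))) (fun s => s)
  have h2 : (PySem.List.sorted (PySem.Set.ofList ((pvSpB papers q).map (fun p => p.1))) (fun s => s) true).Nodup :=
    ((PySem.List.sorted_perm _ _ _).nodup_iff).mpr (PySem.Set.nodup_ofList _)
  have hpair := (h1.and h2).imp (fun h => lt_of_le_of_ne h.1 (fun e => h.2 e.symm))
  have hmem : ∀ p ∈ pvSpB papers q,
      p.1 ∈ PySem.List.sorted (PySem.Set.ofList ((pvSpB papers q).map (fun p => p.1))) (fun s => s) true := by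
    intro p hp
    exact (PySem.List.mem_sorted _ _ _ _).mpr ((PySem.Set.mem_ofList _ _).mpr (List.mem_map_of_mem hp))
  rw [pvGroupSort _ _ hpair hmem]
  simp

lemma pvSliceMap (l : List (Int × String)) (m : Option Int) :
    PySem.List.slice (l.map (fun p => p.2)) none m = (PySem.List.slice l none m).map (fun p => p.2) := by
  cases m <;> simp [PySem.List.slice, List.map_take]

lemma pvMatchedEq (papers : List (List (String × String))) (query : String) (m : Option Int)
    (hq : ¬ (PySem.Str.strip (PySem.Str.lower query) == "") = true) :
    pvFilterSingleA papers query m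
      = PySem.List.slice (pvRankedB papers (PySem.Str.strip (PySem.Str.lower query))) none m := by
  unfold pvFilterSingleA
  rw [if_neg hq]
  have hbody : (fun (acc : List (Int × String)) paper =>
      let searchable := PySem.Str.lower (PySem.Str.join " " [PySem.Dict.getD (PySem.Dict.mk paper) "title" ""])
      let score := pvMatchScoreA searchable (PySem.Str.strip (PySem.Str.lower query))
      if 0 < score then acc ++ [(score, PySem.Dict.getD (PySem.Dict.mk paper) "title" "No Title Found")] else acc)
      = (fun (acc : List (Int × String)) paper =>
          if 0 < pvScoreB paper (PySem.Str.strip (PySem.Str.lower query)) then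
            acc ++ [(pvScoreB paper (PySem.Str.strip (PySem.Str.lower query)), pvTitleB paper)]
          else acc) := by
    funext acc paper
    simp [pvMatchScoreA, pvScoreB, pvTitleLowB, pvTitleB, pvJoinSingle]
  rw [hbody]
  rw [PySem.List.foldl_append_ite (fun paper => 0 < pvScoreB paper (PySem.Str.strip (PySem.Str.lower query)))
        (fun paper => (pvScoreB paper (PySem.Str.strip (PySem.Str.lower query)), pvTitleB paper))]
  rw [pvRankedB_eq, pvSliceMap]
  simp [pvSpB]

-- ===== VERDICT (by name: the statement is the Claim_ definition above) =====
theorem filter_titles_by_queries_spec : Claim_equal_filter_titles_by_queries := by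
  intro papers queries m _
  unfold Spec_filter_titles_by_queries filter_titles_by_queries filter_titles_by_queries_alt
  refine congrArg Prod.snd ?_
  apply PySem.List.foldl_congr_mem
  intro st query _
  by_cases hg : (!(query == "") && !(PySem.Str.strIsspace query)) = true
  · simp only [hg, if_true]
    by_cases hq : (PySem.Str.strip (PySem.Str.lower query) == "") = true
    · have hA : pvFilterSingleA papers query m = [] := by
        unfold pvFilterSingleA
        rw [if_pos hq]
      rw [hA]
      simp [hq]
    · rw [pvMatchedEq papers query m hq]
      simp [hq]
  · rw [if_neg hg, if_neg hg]
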